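-- pv_equiv track=rewrite | github.com/Nama21yo/Natnael_CP | 11-Feb-2025/Sort the Jumbled Numbers 254771.py | map_numbers
-- ===== SOURCE A (Python) =====
-- def map_numbers(num, mapping):
--     # should include this since the number can be 0 but the while
--     # condition won't work for  zero
--     if num == 0:
--         return mapping[0]
--     n = len(mapping)
--     ans = 0
--     unit = 1
--     while num > 0:
--         ans += mapping[num % 10] * unit
--         unit *= 10
--         num //= 10
--
--     return ans
-- ===== SOURCE B (Python) =====
-- def map_numbers(num, mapping):
--     ans = 0
--     for d in str(num):
--         ans = ans * 10 + mapping[int(d)]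
--     return ans
-- ===== Notes on version B (the rewrite author's own statement) =====
-- stated objective: simpler
-- what changed: Replaces the zero guard and the LSB-first while/divmod loop that maintains a growing unit multiplier with a single MSB-first Horner fold (ans = ans*10 + mapping[int(d)]) over the decimal string of num, which handles num == 0 with no special case.
-- outside the precondition, e.g. on map_numbers(-7, [0, 1, 2, 3, 4, 5, 6, 7, 8, 9]): A returns 0, B raises ValueError
import Mathlib
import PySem

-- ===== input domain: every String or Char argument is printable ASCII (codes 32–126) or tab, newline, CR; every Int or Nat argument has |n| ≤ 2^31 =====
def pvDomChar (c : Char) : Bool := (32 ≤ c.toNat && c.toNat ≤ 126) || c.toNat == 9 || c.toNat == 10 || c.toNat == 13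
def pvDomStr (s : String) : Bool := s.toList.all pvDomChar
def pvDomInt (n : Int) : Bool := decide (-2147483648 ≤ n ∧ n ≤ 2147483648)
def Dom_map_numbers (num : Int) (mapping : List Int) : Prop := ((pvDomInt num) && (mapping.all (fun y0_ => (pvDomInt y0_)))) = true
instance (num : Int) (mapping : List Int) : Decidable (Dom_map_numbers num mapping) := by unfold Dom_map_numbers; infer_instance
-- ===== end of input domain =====

-- B replaces A's zero guard and LSB-first while/divmod/unit loop by one MSB-first Horner
-- fold over the decimal string of num (objective: simpler; same asymptotic cost).

-- ===== PORT A =====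
-- the while loop: state (num, ans, unit); fuel num.toNat bounds the iteration count
def mapLoopA (mapping : List Int) : Nat → Int → Int → Int → Int
  | 0, _, ans, _ => ans
  | f + 1, num, ans, unit =>
    if num > 0 then
      mapLoopA mapping f (PySem.Int.floordiv num 10)
        (ans + PySem.List.pyGetD mapping (PySem.Int.mod num 10) 0 * unit) (unit * 10)
    else ans

def map_numbers (num : Int) (mapping : List Int) : Int :=
  if num == 0 then PySem.List.pyGetD mapping 0 0
  else mapLoopA mapping num.toNat num 0 1

-- ===== PORT B =====
-- 'for d in str(num): ans = ans * 10 + mapping[int(d)]' — each 1-char string d is a char c,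
-- and int(d) is PySem.Int.ofChars? [c]  (in range under Pre_, so the .getD 0 default is never the value used)
def map_numbers_alt (num : Int) (mapping : List Int) : Int :=
  (PySem.Int.toStr num).toList.foldl
    (fun ans c => ans * 10 + PySem.List.pyGetD mapping ((PySem.Int.ofChars? [c]).getD 0) 0) 0

-- ===== PRECONDITION & SPEC =====
-- Pre_ excludes (a) negative num, where A returns 0 while B's int('-') raises ValueError, and
-- (b) inputs whose decimal digits do not all index into mapping, where the Python A raises IndexError.
def Pre_map_numbers (num : Int) (mapping : List Int) : Prop :=
  0 ≤ num ∧ mapping ≠ [] ∧ ∀ d ∈ Nat.digits 10 num.toNat, d < mapping.length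
instance (num : Int) (mapping : List Int) : Decidable (Pre_map_numbers num mapping) := by unfold Pre_map_numbers; infer_instance

def pvWitness_map_numbers : Int × List Int := (5, [1, 2, 3, 4, 5, 6])

def Spec_map_numbers (num : Int) (mapping : List Int) (out : Int) : Prop := out = map_numbers_alt num mapping
instance (num : Int) (mapping : List Int) (out : Int) : Decidable (Spec_map_numbers num mapping out) := by unfold Spec_map_numbers; infer_instance

-- ===== CLAIM (what is proved, stated in full; the proofs are below) =====
def Claim_equal_map_numbers : Prop := ∀ (num : Int) (mapping : List Int), Dom_map_numbers num mapping → Pre_map_numbers num mapping → Spec_map_numbers num mapping (map_numbers num mapping)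

-- ===== LEMMAS AND PROOFS =====

-- reference value: the common digit-remap recurrence both ports compute
def refMap (mapping : List Int) (n : Nat) : Int :=
  if _ : n < 10 then mapping.getD n 0
  else refMap mapping (n / 10) * 10 + mapping.getD (n % 10) 0
decreasing_by exact Nat.div_lt_self (by omega) (by norm_num)

-- int(d) of a decimal digit character
theorem ofChars_digitChar (r : Nat) (hr : r < 10) :
    (PySem.Int.ofChars? [Nat.digitChar r]).getD 0 = (r : Int) := by
  interval_cases r <;> decide

-- toDigitsCore with fuel ≥ digits and a seed list appends the seed
theorem toDigitsCore_append (f : Nat) : ∀ (n : Nat) (l : List Char), n < f →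
    Nat.toDigitsCore 10 f n l = Nat.toDigitsCore 10 f n [] ++ l := by
  induction f with
  | zero => intro n l h; omega
  | succ f ih =>
    intro n l _
    simp only [Nat.toDigitsCore]
    by_cases h10 : n / 10 = 0
    · simp [h10]
    · simp only [h10]
      rw [ih (n / 10) ((n % 10).digitChar :: l) (by omega),
          ih (n / 10) [(n % 10).digitChar] (by omega)]
      simp

-- fuel irrelevance of toDigitsCore on an empty seed
theorem toDigitsCore_fuel (n : Nat) : ∀ (f f' : Nat), n < f → n < f' →
    Nat.toDigitsCore 10 f n [] = Nat.toDigitsCore 10 f' n [] := by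
  induction n using Nat.strong_induction_on with
  | _ n ih =>
    intro f f' hf hf'
    match f, f' with
    | f + 1, f' + 1 =>
      simp only [Nat.toDigitsCore]
      by_cases h10 : n / 10 = 0
      · simp [h10]
      · simp only [h10]
        rw [toDigitsCore_append f (n / 10) _ (by omega),
            toDigitsCore_append f' (n / 10) _ (by omega),
            ih (n / 10) (Nat.div_lt_self (by omega) (by norm_num)) f f' (by omega) (by omega)]

-- the MSB-first structure of str(n): last digit split off
theorem toDigits_step (n : Nat) (h : 10 ≤ n) :
    Nat.toDigits 10 n = Nat.toDigits 10 (n / 10) ++ [(n % 10).digitChar] := by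
  have h10 : n / 10 ≠ 0 := by omega
  unfold Nat.toDigits
  rw [show Nat.toDigitsCore 10 (n + 1) n [] = Nat.toDigitsCore 10 n (n / 10) [(n % 10).digitChar] from by
        simp only [Nat.toDigitsCore]; simp [h10]]
  rw [toDigitsCore_append n (n / 10) _ (by omega),
      toDigitsCore_fuel (n / 10) n (n / 10 + 1) (by omega) (by omega)]

theorem toDigits_small (n : Nat) (h : n < 10) : Nat.toDigits 10 n = [n.digitChar] := by
  unfold Nat.toDigits
  simp only [Nat.toDigitsCore]
  have h10 : n / 10 = 0 := by omega
  simp [h10, Nat.mod_eq_of_lt h]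

-- B computes refMap
theorem alt_eq_ref (mapping : List Int) (n : Nat) :
    (Nat.toDigits 10 n).foldl
      (fun ans c => ans * 10 + PySem.List.pyGetD mapping ((PySem.Int.ofChars? [c]).getD 0) 0) 0
      = refMap mapping n := by
  induction n using Nat.strong_induction_on with
  | _ n ih =>
    by_cases h : n < 10
    · rw [toDigits_small n h, refMap]
      simp [h, ofChars_digitChar n h]
    · rw [toDigits_step n (by omega), List.foldl_append,
          ih (n / 10) (Nat.div_lt_self (by omega) (by norm_num))]
      conv_rhs => rw [refMap]
      rw [dif_neg h]
      simp [ofChars_digitChar (n % 10) (by omega)]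
      rw [show ((n : Int) % 10) = ((n % 10 : Nat) : Int) from by push_cast; ring,
          PySem.List.pyGetD_natCast]
      simp [List.getD]

-- A's loop computes refMap (Horner from the other end, via the unit multiplier)
theorem loopA_eq_ref (mapping : List Int) (f : Nat) : ∀ (n : Nat) (ans unit : Int),
    0 < n → n ≤ f →
    mapLoopA mapping f (n : Int) ans unit = ans + unit * refMap mapping n := by
  induction f with
  | zero => intro n _ _ h hf; omega
  | succ f ih =>
    intro n ans unit hn hf
    rw [mapLoopA]
    have hpos : (n : Int) > 0 := by exact_mod_cast hn
    rw [if_pos hpos]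
    rw [show PySem.Int.floordiv (n : Int) 10 = ((n / 10 : Nat) : Int) from
          (by exact_mod_cast PySem.Int.floordiv_natCast n 10),
        show PySem.Int.mod (n : Int) 10 = ((n % 10 : Nat) : Int) from
          (by exact_mod_cast PySem.Int.mod_natCast n 10)]
    by_cases h : n < 10
    · have h0 : n / 10 = 0 := by omega
      rw [h0]
      have : mapLoopA mapping f ((0 : Nat) : Int) (ans + PySem.List.pyGetD mapping ((n % 10 : Nat) : Int) 0 * unit) (unit * 10)
          = ans + PySem.List.pyGetD mapping ((n % 10 : Nat) : Int) 0 * unit := by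
        cases f <;> simp [mapLoopA]
      rw [this, refMap]
      have hmod : n % 10 = n := Nat.mod_eq_of_lt h
      simp [h, hmod]
      ring
    · rw [ih (n / 10) _ _ (by omega) (by omega)]
      conv_rhs => rw [refMap]
      rw [dif_neg h]
      simp
      rw [show ((n : Int) % 10) = ((n % 10 : Nat) : Int) from by push_cast; ring,
          PySem.List.pyGetD_natCast]
      simp [List.getD]
      ring

-- ===== VERDICT (by name: the statement is the Claim_ definition above) =====
theorem map_numbers_spec : Claim_equal_map_numbers := by
  intro num mapping _ hpre
  obtain ⟨hnn, -, -⟩ := hpre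
  unfold Spec_map_numbers map_numbers map_numbers_alt
  rw [PySem.Int.toList_toStr]
  have hnum : num = ((num.toNat : Nat) : Int) := by omega
  by_cases h0 : num = 0
  · subst h0
    simp [PySem.Int.toChars, toDigits_small 0 (by norm_num), ofChars_digitChar 0 (by norm_num),
      PySem.List.pyGetD_zero]
  · have hpos : 0 < num.toNat := by omega
    rw [if_neg (by simpa using h0)]
    rw [show PySem.Int.toChars num = Nat.toDigits 10 num.toNat from by
          simp [PySem.Int.toChars, if_neg (show ¬ num < 0 by omega)]]
    rw [alt_eq_ref]
    have hl := loopA_eq_ref mapping num.toNat num.toNat 0 1 hpos le_rfl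
    rw [← hnum] at hl
    rw [hl]
    ring
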